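-- pv_equiv track=rewrite | github.com/ndronen/spelling | spelling/edits.py | remove_dashes
-- ===== SOURCE A (Python) =====
-- def remove_dashes(index, word):
--     new_word = []
--     new_index = index
--     for i,c in enumerate(word):
--         if c == "-":
--             if i < index:
--                 new_index -= 1
--         else:
--             new_word.append(c)
--     return new_index, ''.join(new_word)
-- ===== SOURCE B (Python) =====
-- def remove_dashes(index, word):
--     new_word = word.replace('-', '')
--     if index > 0:
--         new_index = index - word[:index].count('-')
--     else:
--         new_index = index
--     return new_index, new_word
-- ===== Notes on version B (the rewrite author's own statement) =====
-- stated objective: simpler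
-- what changed: A's single interleaved per-character loop (accumulating kept characters in a list and decrementing the index per dash) is replaced by two independent phases: word.replace('-','') for the string and a count of dashes in the prefix word[:index] (guarded for index <= 0) for the adjusted index.
import Mathlib
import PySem

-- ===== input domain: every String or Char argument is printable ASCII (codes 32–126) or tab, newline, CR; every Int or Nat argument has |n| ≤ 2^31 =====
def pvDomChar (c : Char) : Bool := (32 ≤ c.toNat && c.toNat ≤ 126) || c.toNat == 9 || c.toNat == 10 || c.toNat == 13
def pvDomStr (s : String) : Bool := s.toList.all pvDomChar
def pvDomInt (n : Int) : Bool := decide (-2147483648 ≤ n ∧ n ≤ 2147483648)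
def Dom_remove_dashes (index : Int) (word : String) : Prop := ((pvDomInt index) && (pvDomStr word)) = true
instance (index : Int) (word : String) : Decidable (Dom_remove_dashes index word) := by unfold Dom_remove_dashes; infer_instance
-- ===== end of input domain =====

-- B replaces A's single interleaved loop by two phases: word.replace('-','') for the string
-- and a dash count over the prefix word[:index] for the index (objective: simpler).


-- ===== PORT A =====
def remove_dashes (index : Int) (word : String) : Int × String :=
  let st := (PySem.List.enumerate word.toList 0).foldl
    (fun (st : Int × List Char) ic =>
      if ic.2 == '-' then
        (if ic.1 < index then (st.1 - 1, st.2) else st)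
      else
        (st.1, st.2 ++ [ic.2]))
    (index, [])
  (st.1, String.ofList st.2)

-- ===== PORT B =====
def remove_dashes_alt (index : Int) (word : String) : Int × String :=
  let new_word := PySem.Str.replace word "-" ""
  let new_index :=
    if 0 < index then
      index - (PySem.Str.count (PySem.Str.slice word none (some index)) "-" : Int)
    else index
  (new_index, new_word)

-- ===== PRECONDITION & SPEC =====
def Spec_remove_dashes (index : Int) (word : String) (out : Int × String) : Prop := out = remove_dashes_alt index word
instance (index : Int) (word : String) (out : Int × String) : Decidable (Spec_remove_dashes index word out) := by unfold Spec_remove_dashes; infer_instance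

-- ===== CLAIM (what is proved, stated in full; the proofs are below) =====
def Claim_equal_remove_dashes : Prop := ∀ (index : Int) (word : String), Dom_remove_dashes index word → Spec_remove_dashes index word (remove_dashes index word)

-- ===== LEMMAS AND PROOFS =====

-- single-char count: Chars.count.go with pattern ['-'] counts occurrences
theorem count_go_dash (fuel : Nat) (l : List Char) (acc : Nat) (h : l.length ≤ fuel) :
    PySem.Chars.count.go ['-'] fuel l acc = acc + l.count '-' := by
  induction fuel generalizing l acc with
  | zero =>
    cases l with
    | nil => simp [PySem.Chars.count.go]
    | cons c t => simp at h
  | succ n ih =>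
    cases l with
    | nil => simp [PySem.Chars.count.go]
    | cons c t =>
      simp only [List.length_cons, Nat.succ_le_succ_iff] at h
      by_cases hc : c = '-'
      · subst hc
        have hpre : List.isPrefixOf ['-'] ('-' :: t) = true := by
          simp [List.isPrefixOf]
        simp only [PySem.Chars.count.go, hpre, if_pos]
        rw [ih _ _ (by simpa using h)]
        simp
        omega
      · have hpre : List.isPrefixOf ['-'] (c :: t) = false := by
          simp [List.isPrefixOf]
          exact fun hx => hc hx.symm
        simp only [PySem.Chars.count.go, hpre, Bool.false_eq_true, if_false]
        rw [ih _ _ h]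
        simp [hc]

-- single-char replace with empty replacement: Chars.replace.go with pattern ['-'] filters
theorem replace_go_dash (fuel : Nat) (l : List Char) (acc : List Char) (h : l.length ≤ fuel) :
    PySem.Chars.replace.go ['-'] [] fuel l acc
      = acc.reverse ++ l.filter (fun c => !(c == '-')) := by
  induction fuel generalizing l acc with
  | zero =>
    cases l with
    | nil => simp [PySem.Chars.replace.go]
    | cons c t => simp at h
  | succ n ih =>
    cases l with
    | nil => simp [PySem.Chars.replace.go]
    | cons c t =>
      simp only [List.length_cons, Nat.succ_le_succ_iff] at h
      by_cases hc : c = '-'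
      · subst hc
        have hpre : List.isPrefixOf ['-'] ('-' :: t) = true := by
          simp [List.isPrefixOf]
        simp only [PySem.Chars.replace.go, hpre, if_pos]
        rw [ih _ _ (by simpa using h)]
        simp
      · have hpre : List.isPrefixOf ['-'] (c :: t) = false := by
          simp [List.isPrefixOf]
          exact fun hx => hc hx.symm
        simp only [PySem.Chars.replace.go, hpre, Bool.false_eq_true, if_false]
        rw [ih _ _ h]
        simp [hc]

-- A's fold, characterised: fst subtracts the dashes before position index, snd filters
theorem fold_A (index : Int) (l : List Char) (s : Int) (ni : Int) (acc : List Char) :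
    (PySem.List.enumerate l s).foldl
      (fun (st : Int × List Char) ic =>
        if ic.2 == '-' then
          (if ic.1 < index then (st.1 - 1, st.2) else st)
        else
          (st.1, st.2 ++ [ic.2]))
      (ni, acc)
    = (ni - ((l.take (index - s).toNat).count '-' : Int),
       acc ++ l.filter (fun c => !(c == '-'))) := by
  induction l generalizing s ni acc with
  | nil => simp [PySem.List.enumerate]
  | cons c t ih =>
    rw [PySem.List.enumerate_cons, List.foldl_cons]
    by_cases hc : c = '-'
    · subst hc
      have hb : (('-' == '-') = true) = True := by simp
      simp only [hb, if_true]
      by_cases hs : s < index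
      · rw [if_pos hs, ih (s + 1) (ni - 1) acc, Prod.mk.injEq]
        have h1 : (index - s).toNat = (index - (s + 1)).toNat + 1 := by omega
        refine ⟨?_, ?_⟩
        · rw [h1, List.take_succ_cons, List.count_cons]
          simp
          omega
        · simp
      · rw [if_neg hs, ih (s + 1) ni acc, Prod.mk.injEq]
        have h1 : (index - s).toNat = 0 := by omega
        have h2 : (index - (s + 1)).toNat = 0 := by omega
        rw [h1, h2]
        simp
    · have hb : ((c == '-') = true) = False := by simp [hc]
      simp only [hb, if_false]
      rw [ih (s + 1) ni (acc ++ [c]), Prod.mk.injEq]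
      refine ⟨?_, ?_⟩
      · by_cases hs : s < index
        · have h1 : (index - s).toNat = (index - (s + 1)).toNat + 1 := by omega
          rw [h1, List.take_succ_cons, List.count_cons]
          simp [hc]
        · have h1 : (index - s).toNat = 0 := by omega
          have h2 : (index - (s + 1)).toNat = 0 := by omega
          rw [h1, h2]
          simp
      · simp [hc]

theorem chars_count_dash (l : List Char) : PySem.Chars.count l ['-'] = l.count '-' := by
  have : ¬ (List.isEmpty ['-'] = true) := by simp
  rw [PySem.Chars.count, if_neg this, count_go_dash l.length l 0 le_rfl]
  simp

theorem chars_replace_dash (l : List Char) :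
    PySem.Chars.replace l ['-'] [] = l.filter (fun c => !(c == '-')) := by
  have : ¬ (List.isEmpty ['-'] = true) := by simp
  rw [PySem.Chars.replace, if_neg this, replace_go_dash l.length l [] le_rfl]
  simp

-- ===== VERDICT (by name: the statement is the Claim_ definition above) =====
theorem remove_dashes_spec : Claim_equal_remove_dashes := by
  intro index word _
  unfold Spec_remove_dashes remove_dashes remove_dashes_alt
  simp only
  rw [fold_A index word.toList 0 index []]
  refine Prod.ext ?_ ?_
  · simp only
    by_cases hp : 0 < index
    · rw [if_pos hp]
      have : PySem.Str.count (PySem.Str.slice word none (some index)) "-"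
          = (word.toList.take (index - 0).toNat).count '-' := by
        rw [PySem.Str.count]
        rw [PySem.Str.toList_slice, PySem.Chars.slice_eq_listSlice,
            PySem.List.slice_to]
        have h2 : ("-" : String).toList = ['-'] := rfl
        rw [h2, chars_count_dash]
        · norm_num
        · exact le_of_lt hp
      rw [this]
    · rw [if_neg hp]
      have : (index - 0).toNat = 0 := by omega
      rw [this]
      simp
  · simp only [List.nil_append]
    rw [PySem.Str.replace]
    have h2 : ("-" : String).toList = ['-'] := rfl
    have h3 : ("" : String).toList = [] := rfl
    rw [h2, h3, chars_replace_dash]
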